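-- pv_equiv track=rewrite | github.com/Flogo183/mole | single_binary_runner.py | detect_dataset_type
-- ===== SOURCE A (Python) =====
-- def detect_dataset_type(binary_path):
--     """
--     Auto-detect dataset type from the binary path.
--
--     Returns:
--         tuple: (dataset_type, cwe) where cwe is only set for Juliet
--     """
--     path_lower = binary_path.lower()
--     path_parts = binary_path.replace("\\", "/").split("/")
--
--     # Check for Juliet (look for CWE folder pattern)
--     for part in path_parts:
--         if part.startswith("CWE") and len(part) > 3:
--             return "Juliet", part  # e.g., ("Juliet", "CWE121")
--
--     # Check for dataset keywords in path
--     if "castle" in path_lower: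
--         return "CASTLE", None
--     elif "primevul" in path_lower:
--         return "PrimeVul", None
--
--     # Default to enabling all sources/sinks
--     return "Other", None
-- ===== SOURCE B (Python) =====
-- def detect_dataset_type(binary_path):
--     """
--     Auto-detect dataset type from the binary path.
--
--     Single left-to-right character scan over the normalized path instead of
--     splitting it into a list of parts: at each path-segment boundary, check
--     for a "CWE"-prefixed segment directly.
--
--     Returns:
--         tuple: (dataset_type, cwe) where cwe is only set for Juliet
--     """
--     norm = binary_path.replace("\\", "/")
--     at_boundary = True
--     for i, c in enumerate(norm):
--         if at_boundary and norm.startswith("CWE", i):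
--             seg = ""
--             for d in norm[i:]:
--                 if d == "/":
--                     break
--                 seg = seg + d
--             if len(seg) > 3:
--                 return "Juliet", seg
--         at_boundary = c == "/"
--
--     path_lower = binary_path.lower()
--     if "castle" in path_lower:
--         return "CASTLE", None
--     if "primevul" in path_lower:
--         return "PrimeVul", None
--     return "Other", None
-- ===== Notes on version B (the rewrite author's own statement) =====
-- stated objective: alternative
-- what changed: B replaces A's split-the-path-into-a-list-of-parts-then-loop by a single left-to-right character scan over the normalized path that tests for a Juliet marker segment directly at each path boundary, never materializing the parts list.
import Mathlib
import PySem

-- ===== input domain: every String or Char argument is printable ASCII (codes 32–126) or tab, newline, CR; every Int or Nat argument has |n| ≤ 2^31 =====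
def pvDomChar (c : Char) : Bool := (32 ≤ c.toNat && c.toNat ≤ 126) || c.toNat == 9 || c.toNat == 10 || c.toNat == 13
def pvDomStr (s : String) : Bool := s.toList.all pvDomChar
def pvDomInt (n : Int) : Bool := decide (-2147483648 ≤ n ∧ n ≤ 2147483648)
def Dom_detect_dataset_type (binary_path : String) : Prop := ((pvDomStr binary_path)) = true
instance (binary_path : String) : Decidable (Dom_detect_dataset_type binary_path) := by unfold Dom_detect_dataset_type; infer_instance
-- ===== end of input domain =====

-- B replaces A's split-into-parts-then-loop by a single left-to-right character scan
-- over the normalized path, never materializing the parts list (objective: alternative, same cost).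

-- ===== PORT A =====
-- for part in path_parts: if part.startswith("CWE") and len(part) > 3: return "Juliet", part
-- falling through the loop continues with the keyword checks
def pvLoopA (path_parts : List String) (path_lower : String) : String × Option String :=
  match path_parts with
  | [] =>
    if PySem.Str.isIn "castle" path_lower = true then ("CASTLE", none)
    else if PySem.Str.isIn "primevul" path_lower = true then ("PrimeVul", none)
    else ("Other", none)
  | part :: rest =>
    if PySem.Str.startswith part "CWE" = true ∧ PySem.Str.len part > 3 then ("Juliet", some part)
    else pvLoopA rest path_lower

def detect_dataset_type (binary_path : String) : String × Option String :=
  let path_lower := PySem.Str.lower binary_path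
  let path_parts := (PySem.Str.split? (PySem.Str.replace binary_path "\\" "/") "/").getD []
  pvLoopA path_parts path_lower

-- ===== PORT B =====
-- the for-loop of Source B with its early return: at_boundary is the loop-carried flag;
-- seg, the chars of norm[i:] collected by the inner loop up to the first "/", is takeWhile (· ≠ '/')
def pvScanB : List Char → Bool → Option (List Char)
  | [], _ => none
  | c :: rest, at_boundary =>
    if at_boundary = true ∧ PySem.Chars.startswith (c :: rest) ['C', 'W', 'E'] = true then
      if ((c :: rest).takeWhile (fun d => d ≠ '/')).length > 3 then
        some ((c :: rest).takeWhile (fun d => d ≠ '/'))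
      else pvScanB rest (c == '/')
    else pvScanB rest (c == '/')

def detect_dataset_type_alt (binary_path : String) : String × Option String :=
  let norm := PySem.Str.replace binary_path "\\" "/"
  match pvScanB norm.toList true with
  | some seg => ("Juliet", some (String.ofList seg))
  | none =>
    let path_lower := PySem.Str.lower binary_path
    if PySem.Str.isIn "castle" path_lower = true then ("CASTLE", none)
    else if PySem.Str.isIn "primevul" path_lower = true then ("PrimeVul", none)
    else ("Other", none)

-- ===== PRECONDITION & SPEC =====
def Spec_detect_dataset_type (binary_path : String) (out : String × Option String) : Prop := out = detect_dataset_type_alt binary_path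
instance (binary_path : String) (out : String × Option String) : Decidable (Spec_detect_dataset_type binary_path out) := by unfold Spec_detect_dataset_type; infer_instance

-- ===== CLAIM (what is proved, stated in full; the proofs are below) =====
def Claim_equal_detect_dataset_type : Prop := ∀ (binary_path : String), Dom_detect_dataset_type binary_path → Spec_detect_dataset_type binary_path (detect_dataset_type binary_path)

-- ===== LEMMAS AND PROOFS =====

-- (first segment, remaining segments) of a list of chars split on '/'
def pvMySplit : List Char → List Char × List (List Char)
  | [] => ([], [])
  | c :: cs =>
    let r := pvMySplit cs
    if c = '/' then ([], r.1 :: r.2) else (c :: r.1, r.2)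

-- first segment that starts with "CWE" and has length > 3
def pvFind : List (List Char) → Option (List Char)
  | [] => none
  | p :: ps =>
    if PySem.Chars.startswith p ['C', 'W', 'E'] = true ∧ p.length > 3 then some p else pvFind ps

theorem pvGo (fuel : Nat) : ∀ (l cur : List Char) (acc : List (List Char)), l.length < fuel →
    PySem.Chars.splitOn.go ['/'] fuel l cur acc
      = acc.reverse ++ (cur.reverse ++ (pvMySplit l).1) :: (pvMySplit l).2 := by
  induction fuel with
  | zero => intro l cur acc h; omega
  | succ n ih =>
    intro l cur acc h
    cases l with
    | nil => simp [PySem.Chars.splitOn.go, pvMySplit]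
    | cons c rest =>
      have hlt : rest.length < n := by simp only [List.length_cons] at h; omega
      by_cases hc : c = '/'
      · subst hc
        rw [PySem.Chars.splitOn.go]
        rw [if_pos (by simp [List.isPrefixOf] : List.isPrefixOf ['/'] ('/' :: rest) = true)]
        show PySem.Chars.splitOn.go ['/'] n rest [] (cur.reverse :: acc) = _
        rw [ih rest [] _ hlt]
        simp [pvMySplit]
      · rw [PySem.Chars.splitOn.go]
        rw [if_neg (by simp [List.isPrefixOf, Ne.symm hc])]
        rw [ih rest (c :: cur) acc hlt]
        simp [pvMySplit, hc]

theorem pvSplitOn (cs : List Char) :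
    PySem.Chars.splitOn cs ['/'] = (pvMySplit cs).1 :: (pvMySplit cs).2 := by
  unfold PySem.Chars.splitOn
  rw [pvGo (cs.length + 1) cs [] [] (by omega)]
  simp

theorem pvMySplit_fst (cs : List Char) :
    (pvMySplit cs).1 = cs.takeWhile (fun d => d ≠ '/') := by
  induction cs with
  | nil => simp [pvMySplit]
  | cons c rest ih =>
    by_cases hc : c = '/' <;> simp [pvMySplit, hc, List.takeWhile, ih]

theorem pvCWE_takeWhile {cs : List Char}
    (h : PySem.Chars.startswith cs ['C', 'W', 'E'] = true) :
    PySem.Chars.startswith (cs.takeWhile (fun d => d ≠ '/')) ['C', 'W', 'E'] = true := by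
  rw [PySem.Chars.startswith_iff] at h ⊢
  obtain ⟨t, rfl⟩ := h
  simp [List.takeWhile]

theorem pvCWE_of_takeWhile {cs : List Char}
    (h : PySem.Chars.startswith (cs.takeWhile (fun d => d ≠ '/')) ['C', 'W', 'E'] = true) :
    PySem.Chars.startswith cs ['C', 'W', 'E'] = true := by
  rw [PySem.Chars.startswith_iff] at h ⊢
  exact h.trans (List.takeWhile_prefix _)

theorem pvScan_eq (cs : List Char) :
    pvScanB cs true = pvFind ((pvMySplit cs).1 :: (pvMySplit cs).2)
      ∧ pvScanB cs false = pvFind (pvMySplit cs).2 := by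
  induction cs with
  | nil =>
    constructor <;> simp [pvScanB, pvFind, pvMySplit, PySem.Chars.startswith]
  | cons c rest ih =>
    obtain ⟨ih1, ih2⟩ := ih
    by_cases hc : c = '/'
    · subst hc
      have hpre : PySem.Chars.startswith ('/' :: rest) ['C', 'W', 'E'] = false := by
        simp [PySem.Chars.startswith, List.isPrefixOf]
      constructor
      · rw [pvScanB]
        simp only [hpre, Bool.false_eq_true, and_false, if_false, beq_self_eq_true]
        rw [ih1]
        simp [pvMySplit, pvFind, PySem.Chars.startswith]
      · rw [pvScanB]
        simp only [Bool.false_eq_true, false_and, if_false, beq_self_eq_true]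
        rw [ih1]
        simp [pvMySplit]
    · have hcb : (c == '/') = false := by simp [hc]
      have hms : pvMySplit (c :: rest) = (c :: (pvMySplit rest).1, (pvMySplit rest).2) := by
        simp [pvMySplit, hc]
      have htw : c :: (pvMySplit rest).1 = (c :: rest).takeWhile (fun d => d ≠ '/') := by
        rw [← pvMySplit_fst, hms]
      constructor
      · rw [pvScanB, hms, pvFind, htw]
        by_cases hpre : PySem.Chars.startswith (c :: rest) ['C', 'W', 'E'] = true
        · by_cases hlen : ((c :: rest).takeWhile (fun d => d ≠ '/')).length > 3
          · rw [if_pos ⟨rfl, hpre⟩, if_pos hlen, if_pos ⟨pvCWE_takeWhile hpre, hlen⟩]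
          · rw [if_pos ⟨rfl, hpre⟩, if_neg hlen, hcb,
              if_neg (fun hcon => hlen hcon.2)]
            exact ih2
        · rw [if_neg (fun hcon => hpre hcon.2), hcb,
            if_neg (fun hcon => hpre (pvCWE_of_takeWhile hcon.1))]
          exact ih2
      · rw [pvScanB, hms]
        simp only [Bool.false_eq_true, false_and, if_false, hcb]
        exact ih2

theorem pvLoopA_eq (parts : List (List Char)) (low : String) :
    pvLoopA (parts.map String.ofList) low
      = (match pvFind parts with
         | some seg => ("Juliet", some (String.ofList seg))
         | none =>
           if PySem.Str.isIn "castle" low = true then ("CASTLE", none)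
           else if PySem.Str.isIn "primevul" low = true then ("PrimeVul", (none : Option String))
           else ("Other", none)) := by
  induction parts with
  | nil => simp [pvLoopA, pvFind]
  | cons p ps ih =>
    rw [List.map_cons, pvLoopA, pvFind]
    have hsw : PySem.Str.startswith (String.ofList p) "CWE" = PySem.Chars.startswith p ['C', 'W', 'E'] := by
      simp [PySem.Str.startswith_eq]
    have hlen : PySem.Str.len (String.ofList p) = (p.length : Int) := by
      simp [PySem.Str.len_eq]
    by_cases hcond : PySem.Chars.startswith p ['C', 'W', 'E'] = true ∧ p.length > 3
    · rw [if_pos hcond]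
      rw [if_pos (by rw [hsw, hlen]; exact ⟨hcond.1, by exact_mod_cast hcond.2⟩)]
    · rw [if_neg hcond]
      rw [if_neg (by rw [hsw, hlen]; intro hcon; exact hcond ⟨hcon.1, by exact_mod_cast hcon.2⟩), ih]

theorem pvSplitStr (s : String) :
    (PySem.Str.split? s "/").getD [] = (PySem.Chars.splitOn s.toList ['/']).map String.ofList := by
  have h := PySem.Str.split?_map s "/"
  have hsep : PySem.Chars.split? s.toList "/".toList = some (PySem.Chars.splitOn s.toList ['/']) := by
    simp [PySem.Chars.split?]
  rw [hsep] at h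
  cases ho : PySem.Str.split? s "/" with
  | none => rw [ho] at h; simp at h
  | some L =>
    rw [ho] at h
    simp only [Option.map_some, Option.some.injEq] at h
    rw [Option.getD_some, ← h, List.map_map,
      show String.ofList ∘ String.toList = id from funext fun s => String.ofList_toList,
      List.map_id]

-- ===== VERDICT (by name: the statement is the Claim_ definition above) =====
theorem detect_dataset_type_spec : Claim_equal_detect_dataset_type := by
  intro bp _
  simp only [Spec_detect_dataset_type, detect_dataset_type, detect_dataset_type_alt]
  rw [pvSplitStr, pvLoopA_eq, pvSplitOn, (pvScan_eq (PySem.Str.replace bp "\\" "/").toList).1]
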